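-- pv_equiv track=rewrite | github.com/VictorMartinezG/Parcial2 | Enfoque_Logica/032_Pracrtica 32.py | es_subclase
-- ===== SOURCE A (Python) =====
-- ontologia = {
--     "animal": [],
--     "mamifero": ["animal"],  # mamífero es un tipo de animal
--     "perro": ["mamifero"],   # perro es un tipo de mamífero
--     "gato": ["mamifero"],
--     "ave": ["animal"]
-- }
--
-- def es_subclase(de, a):
--     # Si ambas clases son iguales, es subclase
--     if de == a:
--         return True
--     # Si la clase no tiene padres, termina
--     if de not in ontologia:
--         return False
--     # Busca recursivamente en los padres
--     for padre in ontologia[de]: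
--         if es_subclase(padre, a):
--             return True
--     return False
-- ===== SOURCE B (Python) =====
-- ontologia = {
--     "animal": [],
--     "mamifero": ["animal"],  # mamífero es un tipo de animal
--     "perro": ["mamifero"],   # perro es un tipo de mamífero
--     "gato": ["mamifero"],
--     "ave": ["animal"]
-- }
--
-- def _clausura():
--     # Precompute, once, the set of every class reachable by parent links
--     # (each class counts as its own ancestor).  len(ontologia) propagation
--     # rounds are enough: chains cannot be longer than the number of classes.
--     anc = {c: {c} for c in ontologia}
--     for _ in range(len(ontologia)):
--         for c, padres in ontologia.items():
--             for p in padres: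
--                 anc[c] = anc[c] | anc.get(p, {p})
--     return anc
--
-- _ANC = _clausura()
--
-- def es_subclase(de, a):
--     if de == a:
--         return True
--     s = _ANC.get(de)
--     return s is not None and a in s
-- ===== Notes on version B (the rewrite author's own statement) =====
-- stated objective: alternative
-- what changed: Replaces A's recursive per-query DFS with a transitive-closure table of ancestor sets precomputed once by bounded fixpoint iteration; each query is then a single dict lookup plus set membership.
import Mathlib
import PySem

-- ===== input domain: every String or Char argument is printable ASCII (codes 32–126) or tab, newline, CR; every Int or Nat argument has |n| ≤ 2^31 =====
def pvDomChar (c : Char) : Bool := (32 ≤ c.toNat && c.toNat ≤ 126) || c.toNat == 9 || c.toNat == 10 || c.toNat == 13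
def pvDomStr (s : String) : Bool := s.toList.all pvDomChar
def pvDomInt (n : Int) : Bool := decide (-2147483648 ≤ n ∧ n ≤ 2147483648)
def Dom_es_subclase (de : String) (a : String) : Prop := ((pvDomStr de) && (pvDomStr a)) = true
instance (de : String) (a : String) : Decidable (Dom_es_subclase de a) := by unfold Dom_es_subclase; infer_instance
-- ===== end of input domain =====

-- B replaces A's recursive per-query DFS with a precomputed transitive-closure table of
-- ancestor sets, queried by one lookup plus a set membership; equal return values are proved.

-- ===== PORT A =====
-- the module-level ontology dict, as an insertion-ordered association list
def ontologia : PySem.Dict String (List String) :=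
  PySem.Dict.ofList
    [("animal", []), ("mamifero", ["animal"]), ("perro", ["mamifero"]),
     ("gato", ["mamifero"]), ("ave", ["animal"])]

-- A's recursion, with a fuel counter only as a totality guard: the ontology's
-- ancestor chains have depth ≤ 3, so fuel 8 is never exhausted.
def esA (fuel : Nat) (de : String) (a : String) : Bool :=
  match fuel with
  | 0 => false
  | fuel + 1 =>
    if de == a then true
    else
      match PySem.Dict.get? ontologia de with
      | none => false
      | some padres => padres.any (fun padre => esA fuel padre a)

def es_subclase (de : String) (a : String) : Bool := esA 8 de a

-- ===== PORT B =====
-- Source B's _clausura(): start from {c: {c}}, then len(ontologia) propagation rounds of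
-- anc[c] = anc[c] | anc.get(p, {p}).  (anc[c] is read with getD ∅: c is always a key.)
def clausura : PySem.Dict String (PySem.Set String) :=
  let anc0 : PySem.Dict String (PySem.Set String) :=
    ontologia.items.foldl (fun d cp => d.insert cp.1 (PySem.Set.ofList [cp.1])) PySem.Dict.empty
  (List.range ontologia.items.length).foldl (fun anc _ =>
    ontologia.items.foldl (fun anc cp =>
      cp.2.foldl (fun anc p =>
        anc.insert cp.1
          (PySem.Set.union (anc.getD cp.1 PySem.Set.empty) (anc.getD p (PySem.Set.ofList [p]))))
        anc) anc) anc0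

-- Source B's es_subclase: equality shortcut, then _ANC.get(de) and membership
def es_subclase_alt (de : String) (a : String) : Bool :=
  if de == a then true
  else
    match PySem.Dict.get? clausura de with
    | none => false
    | some s => PySem.Set.contains s a

-- ===== PRECONDITION & SPEC =====
def Spec_es_subclase (de : String) (a : String) (out : Bool) : Prop := out = es_subclase_alt de a
instance (de : String) (a : String) (out : Bool) : Decidable (Spec_es_subclase de a out) := by unfold Spec_es_subclase; infer_instance

-- ===== CLAIM =====
def Claim_equal_es_subclase : Prop := ∀ (de : String) (a : String), Dom_es_subclase de a → Spec_es_subclase de a (es_subclase de a)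

-- ===== LEMMAS AND PROOFS =====

theorem gOnt_animal : PySem.Dict.get? ontologia "animal" = some [] := by decide
theorem gOnt_mamifero : PySem.Dict.get? ontologia "mamifero" = some ["animal"] := by decide
theorem gOnt_perro : PySem.Dict.get? ontologia "perro" = some ["mamifero"] := by decide
theorem gOnt_gato : PySem.Dict.get? ontologia "gato" = some ["mamifero"] := by decide
theorem gOnt_ave : PySem.Dict.get? ontologia "ave" = some ["animal"] := by decide

theorem gCl_animal : PySem.Dict.get? clausura "animal" = some ["animal"] := by decide
theorem gCl_mamifero : PySem.Dict.get? clausura "mamifero" = some ["mamifero", "animal"] := by decide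
theorem gCl_perro : PySem.Dict.get? clausura "perro" = some ["perro", "mamifero", "animal"] := by decide
theorem gCl_gato : PySem.Dict.get? clausura "gato" = some ["gato", "mamifero", "animal"] := by decide
theorem gCl_ave : PySem.Dict.get? clausura "ave" = some ["ave", "animal"] := by decide

theorem es_subclase_notkey (de a : String)
    (h1 : de ≠ "animal") (h2 : de ≠ "mamifero") (h3 : de ≠ "perro")
    (h4 : de ≠ "gato") (h5 : de ≠ "ave") :
    es_subclase de a = es_subclase_alt de a := by
  have b1 : (("animal" : String) == de) = false := beq_eq_false_iff_ne.mpr (Ne.symm h1)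
  have b2 : (("mamifero" : String) == de) = false := beq_eq_false_iff_ne.mpr (Ne.symm h2)
  have b3 : (("perro" : String) == de) = false := beq_eq_false_iff_ne.mpr (Ne.symm h3)
  have b4 : (("gato" : String) == de) = false := beq_eq_false_iff_ne.mpr (Ne.symm h4)
  have b5 : (("ave" : String) == de) = false := beq_eq_false_iff_ne.mpr (Ne.symm h5)
  have hOntItems : ontologia.items =
      [("animal", []), ("mamifero", ["animal"]), ("perro", ["mamifero"]),
       ("gato", ["mamifero"]), ("ave", ["animal"])] := by decide
  have hClItems : clausura.items =
      [("animal", ["animal"]), ("mamifero", ["mamifero", "animal"]),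
       ("perro", ["perro", "mamifero", "animal"]), ("gato", ["gato", "mamifero", "animal"]),
       ("ave", ["ave", "animal"])] := by decide
  have gO : PySem.Dict.get? ontologia de = none := by
    simp [PySem.Dict.get?, hOntItems, List.find?, b1, b2, b3, b4, b5]
  have gC : PySem.Dict.get? clausura de = none := by
    simp [PySem.Dict.get?, hClItems, List.find?, b1, b2, b3, b4, b5]
  by_cases hde : de = a
  · simp [es_subclase, es_subclase_alt, esA, hde]
  · simp [es_subclase, es_subclase_alt, esA, hde, gO, gC]

-- ===== VERDICT =====
theorem es_subclase_spec : Claim_equal_es_subclase := by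
  intro de a _
  unfold Spec_es_subclase
  by_cases h1 : de = "animal"
  · subst h1
    simp [es_subclase, es_subclase_alt, esA, gOnt_animal, gCl_animal, PySem.Set.contains]
    by_cases ha : a = "animal" <;> simp [ha, eq_comm]
  by_cases h2 : de = "mamifero"
  · subst h2
    simp [es_subclase, es_subclase_alt, esA, gOnt_mamifero, gOnt_animal, gCl_mamifero,
      PySem.Set.contains]
    by_cases h : a = "mamifero" <;> by_cases ha : a = "animal" <;> simp [h, ha, eq_comm]
  by_cases h3 : de = "perro"
  · subst h3
    simp [es_subclase, es_subclase_alt, esA, gOnt_perro, gOnt_mamifero, gOnt_animal, gCl_perro,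
      PySem.Set.contains]
    by_cases hp : a = "perro" <;> by_cases h : a = "mamifero" <;> by_cases ha : a = "animal" <;>
      simp [hp, h, ha, eq_comm]
  by_cases h4 : de = "gato"
  · subst h4
    simp [es_subclase, es_subclase_alt, esA, gOnt_gato, gOnt_mamifero, gOnt_animal, gCl_gato,
      PySem.Set.contains]
    by_cases hg : a = "gato" <;> by_cases h : a = "mamifero" <;> by_cases ha : a = "animal" <;>
      simp [hg, h, ha, eq_comm]
  by_cases h5 : de = "ave"
  · subst h5
    simp [es_subclase, es_subclase_alt, esA, gOnt_ave, gOnt_animal, gCl_ave, PySem.Set.contains]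
    by_cases hv : a = "ave" <;> by_cases ha : a = "animal" <;> simp [hv, ha, eq_comm]
  exact es_subclase_notkey de a h1 h2 h3 h4 h5
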